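-- pv_equiv track=rewrite | github.com/Fr4ntastic/jones-twisted-torus | verify_formula_BD.py | compute_k_ell
-- ===== SOURCE A (Python) =====
-- def compute_k_ell(q):
--     p = 3
--     q_hat = q % p
--     for inv in range(1, p):
--         if (q_hat * inv) % p == 1:
--             q_hat_inv = inv
--             break
--     k = min(q_hat_inv, p - q_hat_inv)
--     for i_val in [0, 1, 2]:
--         val = q * k - i_val + 1
--         if val % p == 0 and val // p >= 0:
--             return k, val // p
--     raise ValueError(f"Cannot compute ell for q={q}")
-- ===== SOURCE B (Python) =====
-- def compute_k_ell(q):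
--     p = 3
--     q_hat = q % p
--     if q_hat == 0:
--         raise ValueError(f"q={q} is not invertible modulo {p}")
--     # modulo 3 every unit is its own inverse, so q_hat_inv = q_hat
--     k = min(q_hat, p - q_hat)
--     # the unique i in {0,1,2} with (q*k - i + 1) % 3 == 0 leaves exactly floor((q*k+1)/3)
--     ell = (q * k + 1) // p
--     if ell < 0:
--         raise ValueError(f"Cannot compute ell for q={q}")
--     return k, ell
-- ===== Notes on version B (the rewrite author's own statement) =====
-- stated objective: simpler
-- what changed: Both loops are gone: the inverse-search loop is replaced by the fact that 1 and 2 are their own inverses mod 3, and the scan over i in [0,1,2] is replaced by the closed form ell = (q*k+1)//3, since exactly one offset makes q*k-i+1 divisible by 3 and that offset is the floor-mod remainder.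
import Mathlib
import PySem

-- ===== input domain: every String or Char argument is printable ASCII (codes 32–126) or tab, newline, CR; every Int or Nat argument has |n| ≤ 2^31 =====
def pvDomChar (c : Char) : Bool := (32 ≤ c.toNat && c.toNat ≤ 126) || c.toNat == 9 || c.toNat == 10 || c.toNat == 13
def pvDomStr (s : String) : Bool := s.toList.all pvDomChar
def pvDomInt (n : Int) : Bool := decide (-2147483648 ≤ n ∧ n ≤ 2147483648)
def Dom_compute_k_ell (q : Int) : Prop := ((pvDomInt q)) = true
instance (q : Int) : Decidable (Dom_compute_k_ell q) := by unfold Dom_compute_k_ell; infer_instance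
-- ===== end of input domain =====

-- B removes both loops of A: mod-3 units are self-inverse (so no inverse-search loop) and
-- ell is the closed form (q*k+1)//3 (so no scan over offsets); objective: simpler.


-- ===== PORT A =====
-- literal port of A: first-match loop over range(1,3) for the inverse, then a first-match
-- scan over [0,1,2]; where the Python raises (no inverse found / scan exhausted) the port
-- returns (0,0) — those inputs are excluded by Pre_compute_k_ell.
def compute_k_ell (q : Int) : Int × Int :=
  let p : Int := 3
  let q_hat := PySem.Int.mod q p
  match (PySem.List.pyRange 1 p 1).find? (fun inv => PySem.Int.mod (q_hat * inv) p == 1) with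
  | none => (0, 0)  -- UnboundLocalError in Python
  | some q_hat_inv =>
    let k := min q_hat_inv (p - q_hat_inv)
    match ([0, 1, 2] : List Int).find?
        (fun i_val => PySem.Int.mod (q * k - i_val + 1) p == 0
                      && decide (0 ≤ PySem.Int.floordiv (q * k - i_val + 1) p)) with
    | some i_val => (k, PySem.Int.floordiv (q * k - i_val + 1) p)
    | none => (0, 0)  -- ValueError in Python

-- ===== PORT B =====
-- literal port of Source B; the two raise branches return (0,0), excluded by Pre_compute_k_ell.
def compute_k_ell_alt (q : Int) : Int × Int :=
  let p : Int := 3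
  let q_hat := PySem.Int.mod q p
  if q_hat == 0 then (0, 0)  -- ValueError in Python
  else
    let k := min q_hat (p - q_hat)
    let ell := PySem.Int.floordiv (q * k + 1) p
    if ell < 0 then (0, 0)  -- ValueError in Python
    else (k, ell)

-- ===== PRECONDITION & SPEC =====
-- Pre_ excludes exactly the inputs where A raises: q divisible by 3 (UnboundLocalError from
-- the inverse loop) and q < -1 (the offset scan finds no nonnegative ell: ValueError).
def Pre_compute_k_ell (q : Int) : Prop := PySem.Int.mod q 3 ≠ 0 ∧ -1 ≤ q
instance (q : Int) : Decidable (Pre_compute_k_ell q) := by unfold Pre_compute_k_ell; infer_instance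
def pvWitness_compute_k_ell : Int := 2

def Spec_compute_k_ell (q : Int) (out : Int × Int) : Prop := out = compute_k_ell_alt q
instance (q : Int) (out : Int × Int) : Decidable (Spec_compute_k_ell q out) := by unfold Spec_compute_k_ell; infer_instance

-- ===== CLAIM (what is proved, stated in full; the proofs are below) =====
def Claim_equal_compute_k_ell : Prop := ∀ (q : Int), Dom_compute_k_ell q → Pre_compute_k_ell q → Spec_compute_k_ell q (compute_k_ell q)

-- ===== LEMMAS AND PROOFS =====

-- ===== VERDICT (by name: the statement is the Claim_ definition above) =====
theorem compute_k_ell_spec : Claim_equal_compute_k_ell := by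
  intro q _ hpre
  obtain ⟨hmod, hge⟩ := hpre
  rw [PySem.Int.mod_eq_emod_of_pos (by norm_num)] at hmod
  unfold Spec_compute_k_ell compute_k_ell compute_k_ell_alt
  simp only [PySem.Int.mod_eq_emod_of_pos (show (0:Int) < 3 by norm_num),
    PySem.Int.floordiv_eq_ediv_of_pos (show (0:Int) < 3 by norm_num)]
  have h3 : q % 3 = 1 ∨ q % 3 = 2 := by omega
  rcases h3 with h | h
  · -- q ≡ 1 (mod 3): A's inverse loop stops at inv = 1, offset scan stops at i = 2
    have hrange : PySem.List.pyRange 1 3 1 = [1, 2] := by decide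
    have hf1 : (PySem.List.pyRange 1 3 1).find? (fun inv => (q % 3 * inv) % 3 == 1) = some 1 := by
      rw [hrange]; simp [List.find?, h]
    have b0 : ((q * min 1 (3 - 1) - 0 + 1) % 3 == 0 && decide (0 ≤ (q * min 1 (3 - 1) - 0 + 1) / 3)) = false := by
      simp only [Bool.and_eq_false_iff, beq_eq_false_iff_ne, ne_eq]; left
      simp only [show min (1:Int) (3 - 1) = 1 by norm_num]; omega
    have b1 : ((q * min 1 (3 - 1) - 1 + 1) % 3 == 0 && decide (0 ≤ (q * min 1 (3 - 1) - 1 + 1) / 3)) = false := by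
      simp only [Bool.and_eq_false_iff, beq_eq_false_iff_ne, ne_eq]; left
      simp only [show min (1:Int) (3 - 1) = 1 by norm_num]; omega
    have b2 : ((q * min 1 (3 - 1) - 2 + 1) % 3 == 0 && decide (0 ≤ (q * min 1 (3 - 1) - 2 + 1) / 3)) = true := by
      simp only [Bool.and_eq_true, beq_iff_eq, decide_eq_true_eq,
        show min (1:Int) (3 - 1) = 1 by norm_num]
      constructor <;> omega
    rw [hf1]
    simp only [List.find?, b0, b1, b2, h]
    have hell : ¬ ((q + 1) / 3 < 0) := by omega
    simp only [show min (1:Int) (3 - 1) = 1 by norm_num, mul_one]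
    simp [hell]
    omega
  · -- q ≡ 2 (mod 3): A's inverse loop stops at inv = 2, offset scan stops at i = 0
    have hrange : PySem.List.pyRange 1 3 1 = [1, 2] := by decide
    have hf1 : (PySem.List.pyRange 1 3 1).find? (fun inv => (q % 3 * inv) % 3 == 1) = some 2 := by
      rw [hrange]; simp [List.find?, h]
    have b0 : ((q * min 2 (3 - 2) - 0 + 1) % 3 == 0 && decide (0 ≤ (q * min 2 (3 - 2) - 0 + 1) / 3)) = true := by
      simp only [Bool.and_eq_true, beq_iff_eq, decide_eq_true_eq,
        show min (2:Int) (3 - 2) = 1 by norm_num]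
      constructor <;> omega
    rw [hf1]
    simp only [List.find?, b0, h]
    have hell : ¬ ((q + 1) / 3 < 0) := by omega
    simp only [show min (2:Int) (3 - 2) = 1 by norm_num, mul_one]
    simp [hell]
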